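-- pv_equiv track=rewrite | github.com/jordiae/FarmacoNER | src/preprocessing/fix_brat3.py | bad_text
-- ===== SOURCE A (Python) =====
-- def bad_text(s):
--     if not any(c.isalpha() for c in s):
--         return True
--     if len(s.split()) > 4:
--         return True
--     for c in ['\n', '\t', ' ', ',',';','(',')','.',':','?',"'",'"','/','\\','-','”','“']:
--         if c in s:
--             return True
--     return False
-- ===== SOURCE B (Python) =====
-- DELIMS = {'\n', '\t', ' ', ',', ';', '(', ')', '.', ':', '?', "'", '"', '/', '\\', '-', '\u201d', '\u201c'}
--
--
-- def bad_text(s):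
--     # single pass over the characters: bail out on the first delimiter,
--     # remember whether any alphabetic character was seen
--     has_alpha = False
--     for c in s:
--         if c in DELIMS:
--             return True
--         if c.isalpha():
--             has_alpha = True
--     return (not has_alpha) or len(s.split()) > 4
-- ===== Notes on version B (the rewrite author's own statement) =====
-- stated objective: simpler
-- what changed: Fuses A's three separate scans (the isalpha generator pass, the split pass, and the 16 substring searches over s) into one loop over the characters of s with a has-alpha flag and a delimiter set, with split() only evaluated when no delimiter occurs; the result is the same OR of the three predicates.
import Mathlib
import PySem

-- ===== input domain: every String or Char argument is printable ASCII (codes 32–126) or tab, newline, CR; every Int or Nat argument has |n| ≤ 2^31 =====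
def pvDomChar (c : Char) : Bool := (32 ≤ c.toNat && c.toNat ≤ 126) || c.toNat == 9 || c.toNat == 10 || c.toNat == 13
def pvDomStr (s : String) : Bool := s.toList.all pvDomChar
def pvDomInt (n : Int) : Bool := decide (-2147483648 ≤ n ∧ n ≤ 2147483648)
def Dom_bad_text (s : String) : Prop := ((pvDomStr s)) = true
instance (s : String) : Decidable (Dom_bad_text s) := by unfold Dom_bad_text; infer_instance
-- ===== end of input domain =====

-- B fuses A's three scans into one loop over the characters with a has-alpha flag
-- and a delimiter set (split() only evaluated when no delimiter occurs); same OR of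
-- the same three predicates, so the outputs agree on every input.

-- ===== PORT A =====
-- the literal delimiter list of A's for-loop
def badDelims : List Char :=
  ['\n', '\t', ' ', ',', ';', '(', ')', '.', ':', '?', '\'', '"', '/', '\\', '-', '”', '“']

-- A's for-loop: "for c in [...]: if c in s: return True / return False"
def badLoopA (s : String) : List Char → Bool
  | [] => false
  | c :: rest => if PySem.Str.isIn (String.ofList [c]) s then true else badLoopA s rest

def bad_text (s : String) : Bool :=
  if !(s.toList.any PySem.Chars.isalpha) then true
  else if (PySem.Str.split₀ s).length > 4 then true
  else badLoopA s badDelims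

-- ===== PORT B =====
-- B's DELIMS set literal
def badDelimSet : PySem.Set Char := PySem.Set.ofList badDelims

-- B's single for-loop over the characters of s, carrying the has_alpha flag;
-- after the loop: "(not has_alpha) or len(s.split()) > 4"
def badLoopB (s : String) : List Char → Bool → Bool
  | [], hasAlpha => !hasAlpha || decide ((PySem.Str.split₀ s).length > 4)
  | c :: rest, hasAlpha =>
    if PySem.Set.contains badDelimSet c then true
    else badLoopB s rest (hasAlpha || PySem.Chars.isalpha c)

def bad_text_alt (s : String) : Bool := badLoopB s s.toList false

-- ===== PRECONDITION & SPEC =====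
def Spec_bad_text (s : String) (out : Bool) : Prop := out = bad_text_alt s
instance (s : String) (out : Bool) : Decidable (Spec_bad_text s out) := by unfold Spec_bad_text; infer_instance

-- ===== CLAIM (what is proved, stated in full; the proofs are below) =====
def Claim_equal_bad_text : Prop := ∀ (s : String), Dom_bad_text s → Spec_bad_text s (bad_text s)

-- ===== LEMMAS AND PROOFS =====

-- A's delimiter loop is just an `any` over the delimiter list
theorem badLoopA_eq_any (s : String) (l : List Char) :
    badLoopA s l = l.any (fun c => PySem.Str.isIn (String.ofList [c]) s) := by
  induction l with
  | nil => rfl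
  | cons c rest ih =>
    simp only [badLoopA, List.any_cons, ih]
    split_ifs with h
    · rw [h, Bool.true_or]
    · rw [Bool.not_eq_true] at h
      rw [h, Bool.false_or]

-- a one-character substring test is membership
theorem isIn_singleton (c : Char) (s : String) :
    PySem.Str.isIn (String.ofList [c]) s = s.toList.contains c := by
  rcases h : PySem.Str.isIn (String.ofList [c]) s with _ | _
  · symm
    rw [Bool.eq_false_iff]
    intro hc
    rw [List.contains_iff_mem] at hc
    obtain ⟨pre, suf, hps⟩ := List.append_of_mem hc
    rw [Bool.eq_false_iff] at h
    apply h
    rw [PySem.Str.isIn_iff_infix]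
    exact ⟨pre, suf, by simp [hps]⟩
  · symm
    rw [PySem.Str.isIn_iff_infix] at h
    rw [List.contains_iff_mem]
    exact h.mem (by simp)

-- B's fused loop, characterised: a delimiter anywhere in the remaining characters
-- returns True at once; otherwise the flag accumulates `any isalpha` and the tail check runs
theorem badLoopB_eq (s : String) (l : List Char) (ha : Bool) :
    badLoopB s l ha =
      (l.any (fun c => PySem.Set.contains badDelimSet c) ||
        (!(ha || l.any PySem.Chars.isalpha) || decide ((PySem.Str.split₀ s).length > 4))) := by
  induction l generalizing ha with
  | nil => simp [badLoopB]
  | cons c rest ih =>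
    simp only [badLoopB, List.any_cons]
    split_ifs with hc
    · have hm : c ∈ badDelimSet := (PySem.Set.contains_iff _ _).mp hc
      simp [hm]
    · simp only [Bool.not_eq_true] at hc
      rw [ih, hc]
      cases ha <;> cases PySem.Chars.isalpha c <;> simp [Bool.or_assoc]

-- the two delimiter tests agree: "some delimiter occurs in s" either way round
theorem delim_swap (s : String) :
    badDelims.any (fun c => PySem.Str.isIn (String.ofList [c]) s) =
      s.toList.any (fun c => PySem.Set.contains badDelimSet c) := by
  rw [Bool.eq_iff_iff]
  simp only [isIn_singleton, badDelimSet, PySem.Set.contains_iff,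
    PySem.Set.mem_ofList, List.contains_iff_mem, List.any_eq_true]
  tauto

-- ===== VERDICT (by name: the statement is the Claim_ definition above) =====
theorem bad_text_spec : Claim_equal_bad_text := by
  intro s _
  unfold Spec_bad_text bad_text bad_text_alt
  rw [badLoopB_eq, ← delim_swap, badLoopA_eq_any]
  split_ifs with h1 h2 <;> simp_all
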